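-- pv_equiv track=rewrite | github.com/Whiplashzeb/relation_extration | out_sentence.py | contain_entity
-- ===== SOURCE A (Python) =====
-- def contain_entity(sentence1, sentence2):
--     sentence1 = sentence1.split()
--     sentence2 = sentence2.split()
--
--     chemical1 = False
--     disease1 = False
--     for word in sentence1:
--         if "C_D" in word or "C_C" in word:
--             chemical1 = True
--         if "D_D" in word or "D_C" in word:
--             disease1 = True
--
--     chemical2 = False
--     disease2 = False
--     for word in sentence2:
--         if "C_D" in word or "C_C" in word:
--             chemical2 = True
--         if "D_D" in word or "D_C" in word:
--             disease2 = True
--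
--     if (chemical1 == True and disease2 == True) or (chemical2 == True and disease1 == True):
--         return True
--     else:
--         return False
-- ===== SOURCE B (Python) =====
-- def contain_entity(sentence1, sentence2):
--     chemical1 = "C_D" in sentence1 or "C_C" in sentence1
--     disease1 = "D_D" in sentence1 or "D_C" in sentence1
--     chemical2 = "C_D" in sentence2 or "C_C" in sentence2
--     disease2 = "D_D" in sentence2 or "D_C" in sentence2
--     return (chemical1 and disease2) or (chemical2 and disease1)
-- ===== Notes on version B (the rewrite author's own statement) =====
-- stated objective: simpler
-- what changed: B drops the tokenization entirely: since the four markers contain no whitespace, a marker occurs in some split() word iff it occurs as a substring of the raw sentence, so B uses four direct substring tests per sentence and no loop or flag mutation.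
import Mathlib
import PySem

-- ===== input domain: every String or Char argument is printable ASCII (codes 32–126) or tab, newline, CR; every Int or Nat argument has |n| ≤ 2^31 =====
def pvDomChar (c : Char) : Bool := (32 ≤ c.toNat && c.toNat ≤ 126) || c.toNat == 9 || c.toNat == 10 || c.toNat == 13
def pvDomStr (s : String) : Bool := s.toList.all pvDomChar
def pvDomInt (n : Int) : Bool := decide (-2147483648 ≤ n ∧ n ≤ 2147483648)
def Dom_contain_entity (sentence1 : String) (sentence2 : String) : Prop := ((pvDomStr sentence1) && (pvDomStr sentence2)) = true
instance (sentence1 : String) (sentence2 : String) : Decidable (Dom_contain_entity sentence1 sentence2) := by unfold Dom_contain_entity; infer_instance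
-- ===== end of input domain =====

-- B replaces A's tokenize-and-scan loops by four direct substring tests on the raw
-- sentences (a whitespace-free marker hits a split() word iff it hits the sentence): simpler, no loops.


-- ===== PORT A =====
def contain_entity (sentence1 : String) (sentence2 : String) : Bool :=
  -- sentence1 = sentence1.split(); sentence2 = sentence2.split()
  let words1 := PySem.Str.split₀ sentence1
  let words2 := PySem.Str.split₀ sentence2
  -- chemical1 = False; disease1 = False; for word in sentence1: if …: chemical1 = True; if …: disease1 = True
  let cd1 := words1.foldl (fun cd word =>
      (if PySem.Str.isIn "C_D" word || PySem.Str.isIn "C_C" word then true else cd.1,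
       if PySem.Str.isIn "D_D" word || PySem.Str.isIn "D_C" word then true else cd.2)) (false, false)
  -- chemical2 = False; disease2 = False; for word in sentence2: …
  let cd2 := words2.foldl (fun cd word =>
      (if PySem.Str.isIn "C_D" word || PySem.Str.isIn "C_C" word then true else cd.1,
       if PySem.Str.isIn "D_D" word || PySem.Str.isIn "D_C" word then true else cd.2)) (false, false)
  -- if (chemical1 == True and disease2 == True) or (chemical2 == True and disease1 == True): return True else False
  if (cd1.1 == true && cd2.2 == true) || (cd2.1 == true && cd1.2 == true) then true else false

-- ===== PORT B =====
def contain_entity_alt (sentence1 : String) (sentence2 : String) : Bool :=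
  let chemical1 := PySem.Str.isIn "C_D" sentence1 || PySem.Str.isIn "C_C" sentence1
  let disease1 := PySem.Str.isIn "D_D" sentence1 || PySem.Str.isIn "D_C" sentence1
  let chemical2 := PySem.Str.isIn "C_D" sentence2 || PySem.Str.isIn "C_C" sentence2
  let disease2 := PySem.Str.isIn "D_D" sentence2 || PySem.Str.isIn "D_C" sentence2
  (chemical1 && disease2) || (chemical2 && disease1)

-- ===== PRECONDITION & SPEC =====
def Spec_contain_entity (sentence1 : String) (sentence2 : String) (out : Bool) : Prop := out = contain_entity_alt sentence1 sentence2
instance (sentence1 : String) (sentence2 : String) (out : Bool) : Decidable (Spec_contain_entity sentence1 sentence2 out) := by unfold Spec_contain_entity; infer_instance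

-- ===== CLAIM (what is proved, stated in full; the proofs are below) =====
def Claim_equal_contain_entity : Prop := ∀ (sentence1 : String) (sentence2 : String), Dom_contain_entity sentence1 sentence2 → Spec_contain_entity sentence1 sentence2 (contain_entity sentence1 sentence2)

-- ===== LEMMAS AND PROOFS =====

-- an infix containing no occurrence of c cannot span the splice point of x ++ c :: y
lemma pv_isIn_append_cons (m x y : List Char) (c : Char) (hm : m ≠ []) (hc : c ∉ m) :
    PySem.Chars.isIn m (x ++ c :: y) = (PySem.Chars.isIn m x || PySem.Chars.isIn m y) := by
  rw [Bool.eq_iff_iff]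
  simp only [Bool.or_eq_true]
  rw [← PySem.Chars.exists_prefix_drop_iff_isIn, ← PySem.Chars.exists_prefix_drop_iff_isIn,
      ← PySem.Chars.exists_prefix_drop_iff_isIn]
  constructor
  · rintro ⟨j, hj⟩
    by_cases hjx : j ≤ x.length
    · rw [List.drop_append_of_le_length hjx] at hj
      by_cases hml : m.length ≤ (x.drop j).length
      · left
        refine ⟨j, ?_⟩
        have hm' := List.prefix_iff_eq_take.mp hj
        rw [List.take_append_of_le_length hml] at hm'
        exact hm' ▸ List.take_prefix _ _
      · exfalso
        have hlen : (x.drop j).length < m.length := by omega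
        have h1 : m[(x.drop j).length]'hlen = (x.drop j ++ c :: y)[(x.drop j).length]'(by simp) :=
          hj.getElem _
        have h2 : (x.drop j ++ c :: y)[(x.drop j).length]'(by simp) = c := by
          rw [List.getElem_append_right (le_refl _)]; simp
        exact hc (h1.trans h2 ▸ List.getElem_mem hlen)
    · right
      refine ⟨j - (x.length + 1), ?_⟩
      have he : (x ++ c :: y).drop j = y.drop (j - (x.length + 1)) := by
        have := List.drop_length_add_append (l₁ := x ++ [c]) (l₂ := y) (j - (x.length + 1))
        simp only [List.length_append, List.length_cons, List.length_nil, List.append_assoc,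
          List.cons_append, List.nil_append] at this ⊢
        rw [show x.length + 1 + (j - (x.length + 1)) = j by omega] at this
        exact this
      exact he ▸ hj
  · rintro (⟨j, hj⟩ | ⟨j, hj⟩)
    · by_cases hjx : j ≤ x.length
      · exact ⟨j, by rw [List.drop_append_of_le_length hjx]; exact hj.trans (List.prefix_append _ _)⟩
      · have hnil : x.drop j = [] := by rw [List.drop_eq_nil_iff]; omega
        rw [hnil] at hj
        exact absurd (List.prefix_nil.mp hj) hm
    · refine ⟨x.length + 1 + j, ?_⟩
      have := List.drop_length_add_append (l₁ := x ++ [c]) (l₂ := y) j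
      simp only [List.length_append, List.length_cons, List.length_nil, List.append_assoc,
        List.cons_append, List.nil_append] at this
      rw [this]
      exact hj

-- invariant of split₀.go: a nonempty whitespace-free marker hits some produced word
-- iff it hits a word already in acc or the remaining text cur.reverse ++ s
lemma pv_go (m : List Char) (hm : m ≠ []) (hws : ∀ c ∈ m, PySem.Chars.isspace c = false)
    (hspan : ∀ (x y : List Char) (c : Char), c ∉ m →
      PySem.Chars.isIn m (x ++ c :: y) = (PySem.Chars.isIn m x || PySem.Chars.isIn m y)) :
    ∀ (s cur : List Char) (acc : List (List Char)),
    (PySem.Chars.split₀.go s cur acc).any (fun w => PySem.Chars.isIn m w)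
      = (acc.any (fun w => PySem.Chars.isIn m w) || PySem.Chars.isIn m (cur.reverse ++ s)) := by
  have hempty : PySem.Chars.isIn m [] = false := by
    rw [PySem.Chars.isIn_eq_false_iff]
    exact fun h => hm (List.eq_nil_of_infix_nil h)
  intro s
  induction s with
  | nil =>
    intro cur acc
    simp only [PySem.Chars.split₀.go]
    by_cases hcur : cur = []
    · subst hcur; simp [hempty]
    · simp [List.isEmpty_iff, hcur, List.any_reverse, Bool.or_comm]
  | cons c rest ih =>
    intro cur acc
    simp only [PySem.Chars.split₀.go]
    by_cases hsp : PySem.Chars.isspace c = true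
    · have hc : c ∉ m := fun hmem => by simp [hws c hmem] at hsp
      by_cases hcur : cur = []
      · subst hcur
        simp only [hsp, if_true, List.isEmpty_nil, ih]
        have := hspan [] rest c hc
        simp only [List.nil_append] at this
        simp [this, hempty]
      · rw [if_pos hsp, if_neg (by simp [List.isEmpty_iff, hcur]), ih]
        have := hspan cur.reverse rest c hc
        simp only [this, List.any_cons, List.reverse_nil, List.nil_append]
        ac_rfl
    · rw [if_neg (by simp [hsp]), ih]
      simp

-- l.any distributes over a disjunctive predicate
lemma pv_any_or (l : List String) (p q : String → Bool) :
    l.any (fun w => p w || q w) = (l.any p || l.any q) := by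
  rw [Bool.eq_iff_iff]; simp only [List.any_eq_true, Bool.or_eq_true]
  exact ⟨fun ⟨x, hx, h⟩ => h.imp (⟨x, hx, ·⟩) (⟨x, hx, ·⟩),
    fun h => h.elim (fun ⟨x, hx, h⟩ => ⟨x, hx, Or.inl h⟩) fun ⟨x, hx, h⟩ => ⟨x, hx, Or.inr h⟩⟩

-- a nonempty whitespace-free substring occurs in some word of s.split() iff it occurs in s
lemma pv_sub_any (sub : String) (hm : sub.toList ≠ [])
    (hws : ∀ c ∈ sub.toList, PySem.Chars.isspace c = false) (s : String) :
    (PySem.Str.split₀ s).any (fun w => PySem.Str.isIn sub w) = PySem.Str.isIn sub s := by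
  simp only [PySem.Str.isIn_eq]
  rw [show ((PySem.Str.split₀ s).any fun w => PySem.Chars.isIn sub.toList w.toList)
      = ((PySem.Str.split₀ s).map String.toList).any (fun w => PySem.Chars.isIn sub.toList w) by
    rw [List.any_map]; rfl]
  rw [PySem.Str.split₀_map_toList s]
  show (PySem.Chars.split₀.go s.toList [] []).any _ = _
  rw [pv_go sub.toList hm hws (fun x y c hc => pv_isIn_append_cons _ x y c hm hc) s.toList [] []]
  have hempty : PySem.Chars.isIn sub.toList [] = false := by
    rw [PySem.Chars.isIn_eq_false_iff]
    exact fun h => hm (List.eq_nil_of_infix_nil h)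
  simp

-- per sentence: A's flag loop computes exactly B's whole-string substring tests
lemma pv_flags (s : String) :
    (PySem.Str.split₀ s).foldl (fun cd word =>
      (if PySem.Str.isIn "C_D" word || PySem.Str.isIn "C_C" word then true else cd.1,
       if PySem.Str.isIn "D_D" word || PySem.Str.isIn "D_C" word then true else cd.2)) (false, false)
    = (PySem.Str.isIn "C_D" s || PySem.Str.isIn "C_C" s,
       PySem.Str.isIn "D_D" s || PySem.Str.isIn "D_C" s) := by
  rw [PySem.List.foldl_prod_mk
      (f := fun b word => if PySem.Str.isIn "C_D" word || PySem.Str.isIn "C_C" word then true else b)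
      (g := fun b word => if PySem.Str.isIn "D_D" word || PySem.Str.isIn "D_C" word then true else b)]
  rw [PySem.List.foldl_if_true_eq, PySem.List.foldl_if_true_eq, Bool.false_or, Bool.false_or]
  rw [pv_any_or, pv_any_or]
  rw [pv_sub_any "C_D" (by decide) (by intro c hc; simp at hc; rcases hc with h|h|h <;> subst h <;> rfl), pv_sub_any "C_C" (by decide) (by intro c hc; simp at hc; rcases hc with h|h|h <;> subst h <;> rfl),
      pv_sub_any "D_D" (by decide) (by intro c hc; simp at hc; rcases hc with h|h|h <;> subst h <;> rfl), pv_sub_any "D_C" (by decide) (by intro c hc; simp at hc; rcases hc with h|h|h <;> subst h <;> rfl)]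

-- ===== VERDICT (by name: the statement is the Claim_ definition above) =====
theorem contain_entity_spec : Claim_equal_contain_entity := by
  intro s1 s2 _
  unfold Spec_contain_entity contain_entity contain_entity_alt
  simp only [pv_flags]
  cases PySem.Str.isIn "C_D" s1 || PySem.Str.isIn "C_C" s1 <;>
  cases PySem.Str.isIn "D_D" s1 || PySem.Str.isIn "D_C" s1 <;>
  cases PySem.Str.isIn "C_D" s2 || PySem.Str.isIn "C_C" s2 <;>
  cases PySem.Str.isIn "D_D" s2 || PySem.Str.isIn "D_C" s2 <;> simp
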